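-- pv_equiv track=rewrite | github.com/gassannov/workanimebot | bot/api/decoder.py | decode_provider_url
-- ===== SOURCE A (Python) =====
-- HEX_DECODE_MAP = {
--     # Uppercase letters
--     "79": "A", "7a": "B", "7b": "C", "7c": "D", "7d": "E",
--     "7e": "F", "7f": "G", "70": "H", "71": "I", "72": "J",
--     "73": "K", "74": "L", "75": "M", "76": "N", "77": "O",
--     "68": "P", "69": "Q", "6a": "R", "6b": "S", "6c": "T",
--     "6d": "U", "6e": "V", "6f": "W", "60": "X", "61": "Y",
--     "62": "Z",
--     # Lowercase letters
--     "59": "a", "5a": "b", "5b": "c", "5c": "d", "5d": "e",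
--     "5e": "f", "5f": "g", "50": "h", "51": "i", "52": "j",
--     "53": "k", "54": "l", "55": "m", "56": "n", "57": "o",
--     "48": "p", "49": "q", "4a": "r", "4b": "s", "4c": "t",
--     "4d": "u", "4e": "v", "4f": "w", "40": "x", "41": "y",
--     "42": "z",
--     # Numbers
--     "08": "0", "09": "1", "0a": "2", "0b": "3", "0c": "4",
--     "0d": "5", "0e": "6", "0f": "7", "00": "8", "01": "9",
--     # Special characters
--     "15": "-", "16": ".", "67": "_", "46": "~",
--     "02": ":", "17": "/", "07": "?", "1b": "#",
--     "63": "[", "65": "]", "78": "@", "19": "!",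
--     "1c": "$", "1e": "&", "10": "(", "11": ")",
--     "12": "*", "13": "+", "14": ",", "03": ";",
--     "05": "=", "1d": "%",
-- }
--
-- def decode_provider_url(encrypted_url: str) -> str:
--     """
--     Decode an encrypted provider URL from AllAnime.
--
--     The URL is encrypted as hex pairs that need to be mapped through
--     the substitution table.
--
--     Args:
--         encrypted_url: The encrypted URL string (hex encoded)
--
--     Returns:
--         The decoded URL string
--     """
--     if not encrypted_url:
--         return ""
--
--     # Remove leading "--" if present (as seen in ani-cli response parsing)
--     if encrypted_url.startswith("--"):
--         encrypted_url = encrypted_url[2:]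
--
--     decoded_chars = []
--
--     # Process hex pairs (2 characters at a time)
--     i = 0
--     while i < len(encrypted_url):
--         if i + 1 < len(encrypted_url):
--             hex_pair = encrypted_url[i:i + 2].lower()
--
--             if hex_pair in HEX_DECODE_MAP:
--                 decoded_chars.append(HEX_DECODE_MAP[hex_pair])
--                 i += 2
--             else:
--                 # If not in map, keep original character
--                 decoded_chars.append(encrypted_url[i])
--                 i += 1
--         else:
--             # Odd character at end - keep as is
--             decoded_chars.append(encrypted_url[i])
--             i += 1
--
--     result = "".join(decoded_chars)
--
--     # Apply the /clock -> /clock.json transformation (from ani-cli)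
--     result = result.replace("/clock", "/clock.json")
--
--     return result
-- ===== SOURCE B (Python) =====
-- HEX_DIGITS = "0123456789abcdef"
-- # The substitution table is exactly { "%02x" % (ord(c) ^ 56): c } over the URL-safe
-- # characters below, so decoding a hex pair is chr(int(pair, 16) ^ 56) when that
-- # character is URL-safe, and a non-match otherwise.
-- URL_SAFE = frozenset(
--     "ABCDEFGHIJKLMNOPQRSTUVWXYZ"
--     "abcdefghijklmnopqrstuvwxyz"
--     "0123456789-._~:/?#[]@!$&()*+,;=%"
-- )
--
--
-- def _nibble(ch):
--     """Hex value of ch (case-insensitive), or None if ch is not a hex digit."""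
--     c = ch.lower()
--     if "0" <= c <= "9":
--         return ord(c) - 48
--     if "a" <= c <= "f":
--         return ord(c) - 87
--     return None
--
--
-- def decode_provider_url(encrypted_url: str) -> str:
--     if not encrypted_url:
--         return ""
--     if encrypted_url.startswith("--"):
--         encrypted_url = encrypted_url[2:]
--     # Streaming automaton with a one-character buffer: a buffered hex digit waits
--     # for its partner; a completed pair is decoded arithmetically when URL-safe,
--     # otherwise the buffered character is flushed and the new digit is buffered.
--     out = []
--     pending = None  # (original_char, nibble_value)
--     for ch in encrypted_url:
--         v = _nibble(ch)
--         if v is None: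
--             if pending is not None:
--                 out.append(pending[0])
--                 pending = None
--             out.append(ch)
--         elif pending is None:
--             pending = (ch, v)
--         else:
--             d = chr(((pending[1] << 4) | v) ^ 56)
--             if d in URL_SAFE:
--                 out.append(d)
--                 pending = None
--             else:
--                 out.append(pending[0])
--                 pending = (ch, v)
--     if pending is not None:
--         out.append(pending[0])
--     return "".join(out).replace("/clock", "/clock.json")
-- ===== Notes on version B (the rewrite author's own statement) =====
-- stated objective: alternative
-- what changed: Replaced the 84-entry substitution table and its index-jumping while loop by a streaming automaton with a one-character buffer that decodes each completed hex pair arithmetically (the table is exactly pair -> chr(int(pair,16) XOR 56) restricted to URL-safe characters), flushing the buffered character when no pair forms.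
import Mathlib
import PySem

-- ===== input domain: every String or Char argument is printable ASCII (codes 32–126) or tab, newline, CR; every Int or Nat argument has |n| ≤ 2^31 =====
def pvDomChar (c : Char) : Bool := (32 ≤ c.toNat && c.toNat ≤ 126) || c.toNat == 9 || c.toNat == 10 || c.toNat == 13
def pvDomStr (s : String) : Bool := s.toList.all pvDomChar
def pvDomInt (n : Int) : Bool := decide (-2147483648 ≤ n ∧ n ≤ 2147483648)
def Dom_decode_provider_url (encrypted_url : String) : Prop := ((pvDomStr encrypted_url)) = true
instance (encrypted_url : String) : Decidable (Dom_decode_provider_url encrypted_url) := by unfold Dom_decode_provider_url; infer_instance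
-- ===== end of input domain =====

set_option maxRecDepth 20000

-- B replaces the 84-entry table and the index-jumping while loop by a streaming automaton
-- with a one-character buffer that decodes completed hex pairs arithmetically
-- (the table is exactly pair ↦ chr(int(pair,16) XOR 56) restricted to URL-safe results); objective: alternative.

-- ===== PORT A =====
def pvHexMap : PySem.Dict String String := PySem.Dict.ofList [
  ("79", "A"), ("7a", "B"), ("7b", "C"), ("7c", "D"), ("7d", "E"),
  ("7e", "F"), ("7f", "G"), ("70", "H"), ("71", "I"), ("72", "J"),
  ("73", "K"), ("74", "L"), ("75", "M"), ("76", "N"), ("77", "O"),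
  ("68", "P"), ("69", "Q"), ("6a", "R"), ("6b", "S"), ("6c", "T"),
  ("6d", "U"), ("6e", "V"), ("6f", "W"), ("60", "X"), ("61", "Y"),
  ("62", "Z"), ("59", "a"), ("5a", "b"), ("5b", "c"), ("5c", "d"),
  ("5d", "e"), ("5e", "f"), ("5f", "g"), ("50", "h"), ("51", "i"),
  ("52", "j"), ("53", "k"), ("54", "l"), ("55", "m"), ("56", "n"),
  ("57", "o"), ("48", "p"), ("49", "q"), ("4a", "r"), ("4b", "s"),
  ("4c", "t"), ("4d", "u"), ("4e", "v"), ("4f", "w"), ("40", "x"),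
  ("41", "y"), ("42", "z"), ("08", "0"), ("09", "1"), ("0a", "2"),
  ("0b", "3"), ("0c", "4"), ("0d", "5"), ("0e", "6"), ("0f", "7"),
  ("00", "8"), ("01", "9"), ("15", "-"), ("16", "."), ("67", "_"),
  ("46", "~"), ("02", ":"), ("17", "/"), ("07", "?"), ("1b", "#"),
  ("63", "["), ("65", "]"), ("78", "@"), ("19", "!"), ("1c", "$"),
  ("1e", "&"), ("10", "("), ("11", ")"), ("12", "*"), ("13", "+"),
  ("14", ","), ("03", ";"), ("05", "="), ("1d", "%")
]

-- A's while-loop over the index, as structural recursion on the remaining characters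
-- (step 2 when the lowered pair is a key, step 1 otherwise; lone last char kept).
def pvALoop : List Char → List String
  | [] => []
  | c1 :: rest =>
    match rest with
    | c2 :: rest2 =>
      match pvHexMap.get? (String.ofList (PySem.Chars.lower [c1, c2])) with
      | some v => v :: pvALoop rest2
      | none => String.ofList [c1] :: pvALoop (c2 :: rest2)
    | [] => [String.ofList [c1]]

def decode_provider_url (encrypted_url : String) : String :=
  if PySem.Str.len encrypted_url = 0 then "" else
  let u := if PySem.Str.startswith encrypted_url "--" then PySem.Str.slice encrypted_url (some 2) none else encrypted_url
  let result := PySem.Str.join "" (pvALoop u.toList)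
  PySem.Str.replace result "/clock" "/clock.json"

-- ===== PORT B =====
def pvUrlSafe : PySem.Set Char := PySem.Set.ofList
  "ABCDEFGHIJKLMNOPQRSTUVWXYZabcdefghijklmnopqrstuvwxyz0123456789-._~:/?#[]@!$&()*+,;=%".toList

def pvNibble (ch : Char) : Option Nat :=
  if '0' ≤ PySem.Chars.lowerChar ch ∧ PySem.Chars.lowerChar ch ≤ '9' then
    some ((PySem.Chars.lowerChar ch).toNat - 48)
  else if 'a' ≤ PySem.Chars.lowerChar ch ∧ PySem.Chars.lowerChar ch ≤ 'f' then
    some ((PySem.Chars.lowerChar ch).toNat - 87)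
  else none

-- one step of Source B's for-loop; state = (out, pending)
def pvBStep (st : List Char × Option (Char × Nat)) (ch : Char) : List Char × Option (Char × Nat) :=
  match pvNibble ch with
  | none =>
    match st.2 with
    | some p => (st.1 ++ [p.1] ++ [ch], none)
    | none => (st.1 ++ [ch], none)
  | some v =>
    match st.2 with
    | none => (st.1, some (ch, v))
    | some p =>
      if PySem.Set.contains pvUrlSafe (Char.ofNat (((p.2 <<< 4) ||| v) ^^^ 56)) then
        (st.1 ++ [Char.ofNat (((p.2 <<< 4) ||| v) ^^^ 56)], none)
      else (st.1 ++ [p.1], some (ch, v))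

def decode_provider_url_alt (encrypted_url : String) : String :=
  if PySem.Str.len encrypted_url = 0 then "" else
  let u := if PySem.Str.startswith encrypted_url "--" then PySem.Str.slice encrypted_url (some 2) none else encrypted_url
  let st := u.toList.foldl pvBStep ([], none)
  let out := match st.2 with
    | some p => st.1 ++ [p.1]
    | none => st.1
  PySem.Str.replace (String.ofList out) "/clock" "/clock.json"

-- ===== PRECONDITION & SPEC =====
def Spec_decode_provider_url (encrypted_url : String) (out : String) : Prop := out = decode_provider_url_alt encrypted_url
instance (encrypted_url : String) (out : String) : Decidable (Spec_decode_provider_url encrypted_url out) := by unfold Spec_decode_provider_url; infer_instance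

-- ===== CLAIM (what is proved, stated in full; the proofs are below) =====
def Claim_equal_decode_provider_url : Prop := ∀ (encrypted_url : String), Dom_decode_provider_url encrypted_url → Spec_decode_provider_url encrypted_url (decode_provider_url encrypted_url)

-- ===== LEMMAS AND PROOFS =====

-- the dict of port A with ofList evaluated away, so lookups reduce by get?_mk_cons
def pvHexMapL : PySem.Dict String String := PySem.Dict.mk [
  ("79", "A"), ("7a", "B"), ("7b", "C"), ("7c", "D"), ("7d", "E"),
  ("7e", "F"), ("7f", "G"), ("70", "H"), ("71", "I"), ("72", "J"),
  ("73", "K"), ("74", "L"), ("75", "M"), ("76", "N"), ("77", "O"),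
  ("68", "P"), ("69", "Q"), ("6a", "R"), ("6b", "S"), ("6c", "T"),
  ("6d", "U"), ("6e", "V"), ("6f", "W"), ("60", "X"), ("61", "Y"),
  ("62", "Z"), ("59", "a"), ("5a", "b"), ("5b", "c"), ("5c", "d"),
  ("5d", "e"), ("5e", "f"), ("5f", "g"), ("50", "h"), ("51", "i"),
  ("52", "j"), ("53", "k"), ("54", "l"), ("55", "m"), ("56", "n"),
  ("57", "o"), ("48", "p"), ("49", "q"), ("4a", "r"), ("4b", "s"),
  ("4c", "t"), ("4d", "u"), ("4e", "v"), ("4f", "w"), ("40", "x"),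
  ("41", "y"), ("42", "z"), ("08", "0"), ("09", "1"), ("0a", "2"),
  ("0b", "3"), ("0c", "4"), ("0d", "5"), ("0e", "6"), ("0f", "7"),
  ("00", "8"), ("01", "9"), ("15", "-"), ("16", "."), ("67", "_"),
  ("46", "~"), ("02", ":"), ("17", "/"), ("07", "?"), ("1b", "#"),
  ("63", "["), ("65", "]"), ("78", "@"), ("19", "!"), ("1c", "$"),
  ("1e", "&"), ("10", "("), ("11", ")"), ("12", "*"), ("13", "+"),
  ("14", ","), ("03", ";"), ("05", "="), ("1d", "%")
]

set_option maxRecDepth 40000 in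
theorem pvHexMap_eq : pvHexMap = pvHexMapL := by decide

def pvHexChars : List Char := "0123456789abcdef".toList

def pvHexCh (i : Nat) : Char := pvHexChars.getD i ' '

-- what the pair-lookup in A computes, phrased through B's nibble function
def pvPD (a b : Char) : Option Char :=
  match pvNibble a, pvNibble b with
  | some i, some j =>
    if PySem.Set.contains pvUrlSafe (Char.ofNat (((i <<< 4) ||| j) ^^^ 56)) then
      some (Char.ofNat (((i <<< 4) ||| j) ^^^ 56))
    else none
  | _, _ => none

theorem pvCharLe (a b : Char) : (a ≤ b) ↔ a.toNat ≤ b.toNat := by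
  rw [Char.le_def, UInt32.le_iff_toNat_le]; exact Iff.rfl

theorem pvC0 : ('0' : Char).toNat = 48 := by decide
theorem pvC9 : ('9' : Char).toNat = 57 := by decide
theorem pvCa : ('a' : Char).toNat = 97 := by decide
theorem pvCf : ('f' : Char).toNat = 102 := by decide

-- the 256 hex-pair lookups agree with the arithmetic decode
set_option maxRecDepth 100000 in
set_option maxHeartbeats 4000000 in
theorem pvSafe256 : ∀ i < 16, ∀ j < 16,
    pvHexMapL.get? (String.ofList [pvHexCh i, pvHexCh j]) =
      (if PySem.Set.contains pvUrlSafe (Char.ofNat (((i <<< 4) ||| j) ^^^ 56))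
       then some (String.ofList [Char.ofNat (((i <<< 4) ||| j) ^^^ 56)]) else none) := by
  decide

-- hex-digit shape of a char, as a Bool on codes
def pvHexB (c : Char) : Bool := (48 ≤ c.toNat && c.toNat ≤ 57) || (97 ≤ c.toNat && c.toNat ≤ 102)

theorem pvNibble_none_iff (a : Char) :
    pvNibble a = none ↔ pvHexB (PySem.Chars.lowerChar a) = false := by
  unfold pvNibble pvHexB
  split_ifs with h1 h2 <;>
    simp only [pvCharLe, pvC0, pvC9, not_and, not_le] at h1 <;>
    simp only [Bool.or_eq_false_iff, Bool.and_eq_false_iff,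
      decide_eq_false_iff_not, not_le, false_iff, true_iff, not_and,
      ] <;>
  first
  | omega
  | (simp only [pvCharLe, pvCa, pvCf, not_and, not_le] at h2; omega)

theorem pvNibble_some (a : Char) (i : Nat) (h : pvNibble a = some i) :
    i < 16 ∧ PySem.Chars.lowerChar a = pvHexCh i := by
  unfold pvNibble at h
  split_ifs at h with h1 h2 <;> injection h with h
  · obtain ⟨hlo, hhi⟩ := h1
    rw [pvCharLe, pvC0] at hlo; rw [pvCharLe, pvC9] at hhi
    subst h
    refine ⟨by omega, ?_⟩
    rw [← Char.ofNat_toNat (PySem.Chars.lowerChar a)]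
    interval_cases h : (PySem.Chars.lowerChar a).toNat <;> rfl
  · obtain ⟨hlo, hhi⟩ := h2
    rw [pvCharLe, pvCa] at hlo; rw [pvCharLe, pvCf] at hhi
    subst h
    refine ⟨by omega, ?_⟩
    rw [← Char.ofNat_toNat (PySem.Chars.lowerChar a)]
    interval_cases h : (PySem.Chars.lowerChar a).toNat <;> rfl

theorem pvKeysShape : (pvHexMapL.items.all (fun p =>
    match p.1.toList with
    | [x, y] => pvHexB x && pvHexB y
    | _ => false)) = true := by decide

theorem pvGetNone (l : List (String × String))
    (hshape : (l.all (fun p =>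
      match p.1.toList with
      | [x, y] => pvHexB x && pvHexB y
      | _ => false)) = true)
    (a b : Char) (hab : pvHexB a = false ∨ pvHexB b = false) :
    (PySem.Dict.mk l).get? (String.ofList [a, b]) = none := by
  induction l with
  | nil => rfl
  | cons p rest ih =>
    obtain ⟨k, v⟩ := p
    simp only [List.all_cons, Bool.and_eq_true] at hshape
    rw [PySem.Dict.get?_mk_cons]
    have hne : (k == String.ofList [a, b]) = false := by
      by_contra hcon
      have hbt : (k == String.ofList [a, b]) = true := by
        revert hcon; cases (k == String.ofList [a, b]) <;> simp
      have heq : k = String.ofList [a, b] := beq_iff_eq.mp hbt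
      have hts : k.toList = [a, b] := by rw [heq, String.toList_ofList]
      have hsh := hshape.1
      rw [hts] at hsh
      simp only [Bool.and_eq_true] at hsh
      rcases hab with h | h
      · simp [hsh.1] at h
      · simp [hsh.2] at h
    rw [hne]
    simp only [Bool.false_eq_true, if_false]
    exact ih hshape.2

-- A's pair lookup = the arithmetic decode, for ALL characters
theorem pvPairLemma (a b : Char) :
    pvHexMap.get? (String.ofList (PySem.Chars.lower [a, b])) =
      (pvPD a b).map (fun d => String.ofList [d]) := by
  rw [pvHexMap_eq]
  have hlow : PySem.Chars.lower [a, b] = [PySem.Chars.lowerChar a, PySem.Chars.lowerChar b] := rfl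
  rw [hlow]
  unfold pvPD
  cases hna : pvNibble a with
  | none =>
    rw [pvGetNone _ pvKeysShape _ _ (Or.inl ((pvNibble_none_iff a).mp hna))]
    rfl
  | some i =>
    cases hnb : pvNibble b with
    | none =>
      rw [pvGetNone _ pvKeysShape _ _ (Or.inr ((pvNibble_none_iff b).mp hnb))]
      rfl
    | some j =>
      obtain ⟨hi, ha⟩ := pvNibble_some a i hna
      obtain ⟨hj, hb⟩ := pvNibble_some b j hnb
      rw [ha, hb, pvSafe256 i hi j hj]
      split_ifs with hifs
      · simp [(PySem.Set.contains_iff _ _).mp hifs]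
      · have hmem : Char.ofNat (((i <<< 4) ||| j) ^^^ 56) ∉ pvUrlSafe :=
          fun hm => hifs ((PySem.Set.contains_iff _ _).mpr hm)
        simp [hmem]

-- B's automaton written as recursion on the characters, pending buffer as a parameter
def pvBGo : Option (Char × Nat) → List Char → List Char
  | pend, [] => match pend with | some p => [p.1] | none => []
  | pend, c :: cs =>
    match pvNibble c with
    | none =>
      match pend with
      | some p => p.1 :: c :: pvBGo none cs
      | none => c :: pvBGo none cs
    | some v =>
      match pend with
      | none => pvBGo (some (c, v)) cs
      | some p =>
        if PySem.Set.contains pvUrlSafe (Char.ofNat (((p.2 <<< 4) ||| v) ^^^ 56)) then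
          Char.ofNat (((p.2 <<< 4) ||| v) ^^^ 56) :: pvBGo none cs
        else p.1 :: pvBGo (some (c, v)) cs

theorem pvFoldEq (cs : List Char) : ∀ (acc : List Char) (pend : Option (Char × Nat)),
    (match (cs.foldl pvBStep (acc, pend)).2 with
     | some p => (cs.foldl pvBStep (acc, pend)).1 ++ [p.1]
     | none => (cs.foldl pvBStep (acc, pend)).1) = acc ++ pvBGo pend cs := by
  induction cs with
  | nil => intro acc pend; cases pend <;> simp [pvBGo]
  | cons c cs ih =>
    intro acc pend
    rw [List.foldl_cons]
    cases hn : pvNibble c with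
    | none =>
      cases pend with
      | none =>
        have hstep : pvBStep (acc, none) c = (acc ++ [c], none) := by
          simp [pvBStep, hn]
        rw [hstep, ih]
        conv_rhs => rw [pvBGo]
        simp [hn]
      | some p =>
        have hstep : pvBStep (acc, some p) c = (acc ++ [p.1] ++ [c], none) := by
          simp [pvBStep, hn]
        rw [hstep, ih]
        conv_rhs => rw [pvBGo]
        simp [hn]
    | some v =>
      cases pend with
      | none =>
        have hstep : pvBStep (acc, none) c = (acc, some (c, v)) := by
          simp [pvBStep, hn]
        rw [hstep, ih]
        conv_rhs => rw [pvBGo]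
        simp [hn]
      | some p =>
        by_cases hs : PySem.Set.contains pvUrlSafe (Char.ofNat (((p.2 <<< 4) ||| v) ^^^ 56)) = true
        · have hmem := (PySem.Set.contains_iff _ _).mp hs
          have hstep : pvBStep (acc, some p) c =
              (acc ++ [Char.ofNat (((p.2 <<< 4) ||| v) ^^^ 56)], none) := by
            simp [pvBStep, hn, hmem]
          rw [hstep, ih]
          conv_rhs => rw [pvBGo]
          simp [hn, hmem]
        · have hmem : Char.ofNat (((p.2 <<< 4) ||| v) ^^^ 56) ∉ pvUrlSafe :=
            fun hm => hs (List.elem_eq_true_of_mem hm)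
          have hstep : pvBStep (acc, some p) c = (acc ++ [p.1], some (c, v)) := by
            simp [pvBStep, hn, hmem]
          rw [hstep, ih]
          conv_rhs => rw [pvBGo]
          simp [hn, hmem]

-- joining with the empty separator peels one string off
theorem pvJoinCons (x : List Char) (l : List (List Char)) :
    PySem.Chars.join [] (x :: l) = x ++ PySem.Chars.join [] l := by
  cases l with
  | nil => rw [PySem.Chars.join_singleton]; simp [PySem.Chars.join_nil]
  | cons y l => rw [PySem.Chars.join_cons_cons]; simp

-- the decoded character streams of the two programs coincide
theorem pvAB (cs : List Char) :
    PySem.Chars.join [] ((pvALoop cs).map String.toList) = pvBGo none cs := by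
  match cs with
  | [] => rfl
  | [c] =>
    rw [pvALoop]
    conv_rhs => rw [pvBGo]
    cases hn : pvNibble c with
    | none => simp [pvBGo, PySem.Chars.join_singleton]
    | some v => simp [pvBGo, PySem.Chars.join_singleton]
  | c1 :: c2 :: cs =>
    rw [pvALoop, pvPairLemma]
    cases hn1 : pvNibble c1 with
    | none =>
      have hpd : pvPD c1 c2 = none := by simp [pvPD, hn1]
      rw [hpd]
      have ih := pvAB (c2 :: cs)
      simp only [Option.map_none, List.map_cons, String.toList_ofList, pvJoinCons]
      rw [ih]
      conv_rhs => rw [pvBGo]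
      simp only [hn1]
      rw [List.singleton_append]
    | some i =>
      cases hn2 : pvNibble c2 with
      | none =>
        have hpd : pvPD c1 c2 = none := by simp [pvPD, hn1, hn2]
        rw [hpd]
        have ih := pvAB (c2 :: cs)
        simp only [Option.map_none, List.map_cons, String.toList_ofList, pvJoinCons]
        rw [ih]
        conv_rhs => rw [pvBGo]
        simp only [hn1]
        conv_rhs => rw [pvBGo]
        simp only [hn2]
        conv_lhs => rw [pvBGo]
        simp only [hn2]
        rw [List.singleton_append]
      | some j =>
        have ih := pvAB cs
        have ih2 := pvAB (c2 :: cs)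
        by_cases hs : PySem.Set.contains pvUrlSafe (Char.ofNat (((i <<< 4) ||| j) ^^^ 56)) = true
        · have hmem := (PySem.Set.contains_iff _ _).mp hs
          have hpd : pvPD c1 c2 = some (Char.ofNat (((i <<< 4) ||| j) ^^^ 56)) := by
            simp [pvPD, hn1, hn2, hmem]
          rw [hpd]
          simp only [Option.map_some, List.map_cons, String.toList_ofList, pvJoinCons]
          rw [ih]
          conv_rhs => rw [pvBGo]
          simp only [hn1]
          conv_rhs => rw [pvBGo]
          simp only [hn2]
          rw [if_pos hs]
          rw [List.singleton_append]
        · have hmem : Char.ofNat (((i <<< 4) ||| j) ^^^ 56) ∉ pvUrlSafe :=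
            fun hm => hs ((PySem.Set.contains_iff _ _).mpr hm)
          have hpd : pvPD c1 c2 = none := by simp [pvPD, hn1, hn2, hmem]
          rw [hpd]
          simp only [Option.map_none, List.map_cons, String.toList_ofList, pvJoinCons]
          rw [ih2]
          conv_rhs => rw [pvBGo]
          simp only [hn1]
          conv_rhs => rw [pvBGo]
          simp only [hn2]
          rw [if_neg hs]
          conv_lhs => rw [pvBGo]
          simp only [hn2]
          rw [List.singleton_append]
termination_by cs.length

-- top-level bridge: A's joined pieces = B's flushed fold, as Strings
theorem pvTop (u : String) :
    PySem.Str.join "" (pvALoop u.toList) =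
      String.ofList (match (u.toList.foldl pvBStep ([], none)).2 with
        | some p => (u.toList.foldl pvBStep ([], none)).1 ++ [p.1]
        | none => (u.toList.foldl pvBStep ([], none)).1) := by
  rw [pvFoldEq u.toList [] none, List.nil_append, ← pvAB]
  have h : (PySem.Str.join "" (pvALoop u.toList)).toList =
      PySem.Chars.join [] ((pvALoop u.toList).map String.toList) := by
    simp [PySem.Str.toList_join]
  rw [← h, String.ofList_toList]

-- ===== VERDICT (by name: the statement is the Claim_ definition above) =====
theorem decode_provider_url_spec : Claim_equal_decode_provider_url := by
  unfold Claim_equal_decode_provider_url Spec_decode_provider_url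
  intro s _
  show decode_provider_url s = decode_provider_url_alt s
  unfold decode_provider_url decode_provider_url_alt
  by_cases h0 : PySem.Str.len s = 0
  · rw [if_pos h0, if_pos h0]
  · rw [if_neg h0, if_neg h0]
    exact congrArg (fun r => PySem.Str.replace r "/clock" "/clock.json") (pvTop _)
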